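-- pv_equiv track=rewrite | github.com/NycolasFelipe/uff-ciencia-computacao | beecrowd/1929_triangulo.py | trianguloValido
-- ===== SOURCE A (Python) =====
-- def trianguloValido(lados):
--   for i in range(len(lados)):
--     lado_a = lados[i]
--
--     for j in range(len(lados)):
--       lado_b = lados[j]
--
--       for k in range(len(lados)):
--         lado_c = lados[k]
--
--         if i != j and i != k and j != k:
--           if lado_a < lado_b + lado_c:
--             if lado_b < lado_a + lado_c:
--               if lado_c < lado_a + lado_b:
--                 return True
--   return False
-- ===== SOURCE B (Python) =====
-- def trianguloValido(lados):
--   s = sorted(lados)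
--   return any(s[i] + s[i + 1] > s[i + 2] for i in range(len(s) - 2))
-- ===== Notes on version B (the rewrite author's own statement) =====
-- stated objective: faster
-- what changed: Replaced the O(n^3) scan over all index triples by sort-then-scan: after sorting, only consecutive triples need the single inequality s[i]+s[i+1]>s[i+2].
import Mathlib
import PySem

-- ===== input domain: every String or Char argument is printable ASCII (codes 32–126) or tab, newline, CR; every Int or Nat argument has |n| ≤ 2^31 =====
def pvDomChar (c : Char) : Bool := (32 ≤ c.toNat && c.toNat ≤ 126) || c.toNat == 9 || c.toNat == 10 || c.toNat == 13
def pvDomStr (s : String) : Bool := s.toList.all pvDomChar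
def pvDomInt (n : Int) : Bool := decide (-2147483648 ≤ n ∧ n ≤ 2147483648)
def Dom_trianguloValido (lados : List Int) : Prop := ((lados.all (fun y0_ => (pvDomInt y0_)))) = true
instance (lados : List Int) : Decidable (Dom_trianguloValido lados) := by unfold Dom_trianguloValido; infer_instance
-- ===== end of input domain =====

-- B replaces A's O(n^3) scan over all distinct index triples by sort-then-scan of consecutive triples (objective: faster).

-- ===== PORT A =====
-- Triple nested loop over all index triples; Python's early `return True` is the
-- first success of `any`.  `lados[i]` with i ∈ range(len(lados)) is always in
-- range, so `getD _ 0` is exact here.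
def trianguloValido (lados : List Int) : Bool :=
  (List.range lados.length).any (fun i =>
    let lado_a := lados.getD i 0
    (List.range lados.length).any (fun j =>
      let lado_b := lados.getD j 0
      (List.range lados.length).any (fun k =>
        let lado_c := lados.getD k 0
        decide (i ≠ j) && decide (i ≠ k) && decide (j ≠ k) &&
          decide (lado_a < lado_b + lado_c) &&
          decide (lado_b < lado_a + lado_c) &&
          decide (lado_c < lado_a + lado_b))))

-- ===== PORT B =====
-- sorted(lados), then scan consecutive triples; indices i, i+1, i+2 with
-- i ∈ range(len(s)-2) are always in range, so `getD _ 0` is exact here.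
def trianguloValido_alt (lados : List Int) : Bool :=
  let s := PySem.List.sorted lados (fun x => x)
  (List.range (s.length - 2)).any (fun i =>
    decide (s.getD i 0 + s.getD (i + 1) 0 > s.getD (i + 2) 0))

-- ===== PRECONDITION & SPEC =====
def Spec_trianguloValido (lados : List Int) (out : Bool) : Prop := out = trianguloValido_alt lados
instance (lados : List Int) (out : Bool) : Decidable (Spec_trianguloValido lados out) := by unfold Spec_trianguloValido; infer_instance

-- ===== CLAIM (what is proved, stated in full; the proofs are below) =====
def Claim_equal_trianguloValido : Prop := ∀ (lados : List Int), Dom_trianguloValido lados → Spec_trianguloValido lados (trianguloValido lados)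

-- ===== LEMMAS AND PROOFS =====

-- the (symmetric) triangle condition A tests
def pvTri (a b c : Int) : Prop := a < b + c ∧ b < a + c ∧ c < a + b

theorem pvPermPair (u v x y : Int) (h : [u, v].Perm [x, y]) :
    (u = x ∧ v = y) ∨ (u = y ∧ v = x) := by
  have hu : u ∈ [x, y] := h.mem_iff.mp (by simp)
  simp at hu
  rcases hu with rfl | rfl
  · left
    have := h.cons_inv; simp at this; exact ⟨rfl, this⟩
  · right
    have h2 : [u, v].Perm [u, x] := h.trans (List.Perm.swap u x [])
    have := h2.cons_inv; simp at this; exact ⟨rfl, this⟩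

theorem pvPermTriple (u v w x y z : Int) (h : [u, v, w].Perm [x, y, z]) :
    (u = x ∧ ((v = y ∧ w = z) ∨ (v = z ∧ w = y))) ∨
    (u = y ∧ ((v = x ∧ w = z) ∨ (v = z ∧ w = x))) ∨
    (u = z ∧ ((v = x ∧ w = y) ∨ (v = y ∧ w = x))) := by
  have hu : u ∈ [x, y, z] := h.mem_iff.mp (by simp)
  simp at hu
  rcases hu with rfl | rfl | rfl
  · exact Or.inl ⟨rfl, pvPermPair _ _ _ _ h.cons_inv⟩
  · refine Or.inr (Or.inl ⟨rfl, ?_⟩)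
    have h2 : [u, v, w].Perm [u, x, z] := h.trans (List.Perm.swap u x [z])
    exact pvPermPair _ _ _ _ h2.cons_inv
  · refine Or.inr (Or.inr ⟨rfl, ?_⟩)
    have hrot : [x, y, u].Perm [u, x, y] :=
      ((List.Perm.swap u y []).cons x).trans (List.Perm.swap u x [y])
    have h2 : [u, v, w].Perm [u, x, y] := h.trans hrot
    exact pvPermPair _ _ _ _ h2.cons_inv

theorem pvTriPerm (u v w x y z : Int) (h : [u, v, w].Perm [x, y, z])
    (ht : pvTri x y z) : pvTri u v w := by
  unfold pvTri at *
  rcases pvPermTriple u v w x y z h with ⟨rfl, h2⟩ | ⟨rfl, h2⟩ | ⟨rfl, h2⟩ <;>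
    rcases h2 with ⟨rfl, rfl⟩ | ⟨rfl, rfl⟩ <;> omega

-- a 3-element sublist names three increasing positions with those values
theorem pvSublist2 (l : List Int) (x y : Int) (h : [x, y].Sublist l) :
    ∃ p q, p < q ∧ q < l.length ∧ l.getD p 0 = x ∧ l.getD q 0 = y := by
  induction l with
  | nil => cases h
  | cons a t ih =>
    cases h with
    | cons _ h' =>
      obtain ⟨p, q, hpq, hq, hx, hy⟩ := ih h'
      exact ⟨p + 1, q + 1, by omega, by simpa using hq, by simpa using hx, by simpa using hy⟩
    | cons₂ _ h' =>
      have hy : y ∈ t := h'.subset (by simp)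
      obtain ⟨i, hi, hv⟩ := List.getElem_of_mem hy
      refine ⟨0, i + 1, by omega, by simpa using hi, rfl, ?_⟩
      rw [List.getD_cons_succ, List.getD_eq_getElem t 0 hi]
      exact hv

theorem pvSublist3 (l : List Int) (x y z : Int) (h : [x, y, z].Sublist l) :
    ∃ p q r, p < q ∧ q < r ∧ r < l.length ∧
      l.getD p 0 = x ∧ l.getD q 0 = y ∧ l.getD r 0 = z := by
  induction l with
  | nil => cases h
  | cons a t ih =>
    cases h with
    | cons _ h' =>
      obtain ⟨p, q, r, hpq, hqr, hr, hx, hy, hz⟩ := ih h'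
      exact ⟨p + 1, q + 1, r + 1, by omega, by omega, by simpa using hr,
        by simpa using hx, by simpa using hy, by simpa using hz⟩
    | cons₂ _ h' =>
      obtain ⟨p, q, hpq, hq, hy, hz⟩ := pvSublist2 t y z h'
      exact ⟨0, p + 1, q + 1, by omega, by omega, by simpa using hq, rfl,
        by simpa using hy, by simpa using hz⟩

-- converse: three increasing positions give a 3-element sublist
theorem pvIdxSublist2 (l : List Int) (p q : ℕ) (hpq : p < q) (hq : q < l.length) :
    [l.getD p 0, l.getD q 0].Sublist l := by
  have hp : p < l.length := by omega
  have hdrop : l.getD q 0 ∈ l.drop (p + 1) := by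
    have hlt : q - (p + 1) < (l.drop (p + 1)).length := by simp; omega
    have : (l.drop (p + 1))[q - (p + 1)]'hlt = l[q]'hq := by
      rw [List.getElem_drop]; congr 1; omega
    rw [List.getD_eq_getElem l 0 hq, ← this]
    exact List.getElem_mem hlt
  have h1 : [l.getD q 0].Sublist (l.drop (p + 1)) := List.singleton_sublist.mpr hdrop
  have h2 : (l.getD p 0 :: [l.getD q 0]).Sublist (l[p]'hp :: l.drop (p + 1)) := by
    rw [List.getD_eq_getElem l 0 hp]; exact h1.cons₂ _
  rw [List.getElem_cons_drop hp] at h2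
  exact h2.trans (List.drop_sublist p l)

theorem pvIdxSublist3 (l : List Int) (p q r : ℕ) (hpq : p < q) (hqr : q < r)
    (hr : r < l.length) : [l.getD p 0, l.getD q 0, l.getD r 0].Sublist l := by
  have hp : p < l.length := by omega
  have hlen : ∀ i, i < l.length → i - (p + 1) < (l.drop (p + 1)).length := by
    intro i hi; simp; omega
  have hgd : ∀ i, p < i → (hi : i < l.length) → (l.drop (p + 1)).getD (i - (p + 1)) 0 = l.getD i 0 := by
    intro i hpi hi
    rw [List.getD_eq_getElem _ 0 (hlen i hi), List.getD_eq_getElem l 0 hi, List.getElem_drop]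
    congr 1; omega
  have h1 : [l.getD q 0, l.getD r 0].Sublist (l.drop (p + 1)) := by
    have := pvIdxSublist2 (l.drop (p + 1)) (q - (p + 1)) (r - (p + 1))
      (by omega) (by simp; omega)
    rwa [hgd q hpq (by omega), hgd r (by omega) hr] at this
  have h2 : (l.getD p 0 :: [l.getD q 0, l.getD r 0]).Sublist (l[p]'hp :: l.drop (p + 1)) := by
    rw [List.getD_eq_getElem l 0 hp]; exact h1.cons₂ _
  rw [List.getElem_cons_drop hp] at h2
  exact h2.trans (List.drop_sublist p l)

-- a triangle triple that embeds as a sub-multiset of l sits at three increasing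
-- positions of l (in some order), and pvTri is permutation-invariant
theorem pvCore (l : List Int) (x y z : Int) (h : [x, y, z].Subperm l)
    (ht : pvTri x y z) :
    ∃ p q r, p < q ∧ q < r ∧ r < l.length ∧
      pvTri (l.getD p 0) (l.getD q 0) (l.getD r 0) := by
  obtain ⟨l', hperm, hsub⟩ := h
  have hlen : l'.length = 3 := by simpa using hperm.length_eq
  match l', hlen with
  | [u, v, w], _ =>
    have ht' : pvTri u v w := pvTriPerm u v w x y z hperm ht
    obtain ⟨p, q, r, hpq, hqr, hr, hu, hv, hw⟩ := pvSublist3 l u v w hsub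
    exact ⟨p, q, r, hpq, hqr, hr, by rw [hu, hv, hw]; exact ht'⟩

-- A's result: some triple of pairwise distinct indices satisfies pvTri
theorem pvA_iff (lados : List Int) :
    trianguloValido lados = true ↔
      ∃ i j k, i < lados.length ∧ j < lados.length ∧ k < lados.length ∧
        i ≠ j ∧ i ≠ k ∧ j ≠ k ∧
        pvTri (lados.getD i 0) (lados.getD j 0) (lados.getD k 0) := by
  simp only [trianguloValido, List.any_eq_true, List.mem_range, Bool.and_eq_true,
    decide_eq_true_eq, ne_eq]
  unfold pvTri
  constructor
  · rintro ⟨i, hi, j, hj, k, hk, ⟨⟨⟨⟨h1, h2⟩, h3⟩, h4⟩, h5⟩, h6⟩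
    exact ⟨i, j, k, hi, hj, hk, h1, h2, h3, h4, h5, h6⟩
  · rintro ⟨i, j, k, hi, hj, hk, h1, h2, h3, h4, h5, h6⟩
    exact ⟨i, hi, j, hj, k, hk, ⟨⟨⟨⟨h1, h2⟩, h3⟩, h4⟩, h5⟩, h6⟩

-- B's result: some consecutive triple of the sorted list satisfies the inequality
theorem pvB_iff (lados : List Int) :
    trianguloValido_alt lados = true ↔
      ∃ i, i + 2 < (PySem.List.sorted lados (fun x => x)).length ∧
        (PySem.List.sorted lados (fun x => x)).getD (i + 2) 0 <
          (PySem.List.sorted lados (fun x => x)).getD i 0 +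
          (PySem.List.sorted lados (fun x => x)).getD (i + 1) 0 := by
  simp only [trianguloValido_alt, List.any_eq_true, List.mem_range, decide_eq_true_eq,
    gt_iff_lt]
  constructor
  · rintro ⟨i, hi, h⟩; exact ⟨i, by omega, h⟩
  · rintro ⟨i, hi, h⟩; exact ⟨i, by omega, h⟩

-- sort any distinct index triple
theorem pvOrderTriple (l : List Int) (i j k : ℕ) (hi : i < l.length)
    (hj : j < l.length) (hk : k < l.length) (hij : i ≠ j) (hik : i ≠ k)
    (hjk : j ≠ k) (ht : pvTri (l.getD i 0) (l.getD j 0) (l.getD k 0)) :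
    ∃ p q r, p < q ∧ q < r ∧ r < l.length ∧
      pvTri (l.getD p 0) (l.getD q 0) (l.getD r 0) := by
  unfold pvTri at *
  rcases Nat.lt_trichotomy i j with h1 | h1 | h1 <;>
    rcases Nat.lt_trichotomy i k with h2 | h2 | h2 <;>
      rcases Nat.lt_trichotomy j k with h3 | h3 | h3 <;>
        first
        | omega
        | exact ⟨i, j, k, by omega, by omega, by omega, by omega⟩
        | exact ⟨i, k, j, by omega, by omega, by omega, by omega⟩
        | exact ⟨j, i, k, by omega, by omega, by omega, by omega⟩
        | exact ⟨j, k, i, by omega, by omega, by omega, by omega⟩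
        | exact ⟨k, i, j, by omega, by omega, by omega, by omega⟩
        | exact ⟨k, j, i, by omega, by omega, by omega, by omega⟩

theorem pvMono (lados : List Int) (p q : ℕ) (hpq : p ≤ q)
    (hq : q < (PySem.List.sorted lados (fun x => x)).length) :
    (PySem.List.sorted lados (fun x => x)).getD p 0 ≤
      (PySem.List.sorted lados (fun x => x)).getD q 0 := by
  rw [List.getD_eq_getElem _ 0 hq, List.getD_eq_getElem _ 0 (by omega)]
  exact PySem.List.sorted_id_getElem_mono lados hpq hq

theorem pvMain (lados : List Int) :
    trianguloValido lados = trianguloValido_alt lados := by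
  by_cases hA : trianguloValido lados = true
  case pos =>
    rw [hA]; symm
    rw [pvB_iff]
    obtain ⟨i, j, k, hi, hj, hk, hij, hik, hjk, ht⟩ := (pvA_iff lados).mp hA
    obtain ⟨p, q, r, hpq, hqr, hr, ht'⟩ := pvOrderTriple lados i j k hi hj hk hij hik hjk ht
    -- move the triple (as a sub-multiset) into the sorted list
    have hsub : [lados.getD p 0, lados.getD q 0, lados.getD r 0].Subperm
        (PySem.List.sorted lados (fun x => x)) :=
      (pvIdxSublist3 lados p q r hpq hqr hr).subperm.trans
        (PySem.List.sorted_perm lados (fun x => x) false).symm.subperm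
    obtain ⟨p', q', r', hpq', hqr', hr', ht''⟩ :=
      pvCore (PySem.List.sorted lados (fun x => x)) _ _ _ hsub ht'
    refine ⟨r' - 2, by omega, ?_⟩
    have e1 : r' - 2 + 1 = r' - 1 := by omega
    have e2 : r' - 2 + 2 = r' := by omega
    rw [e1, e2]
    have m1 := pvMono lados p' (r' - 2) (by omega) (by omega)
    have m2 := pvMono lados q' (r' - 1) (by omega) (by omega)
    unfold pvTri at ht''
    omega
  case neg =>
    have hA' : trianguloValido lados = false := by
      cases h : trianguloValido lados
      · rfl
      · exact absurd h hA
    rw [hA']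
    cases hB : trianguloValido_alt lados
    · rfl
    exfalso
    apply hA
    rw [pvA_iff]
    obtain ⟨i, hi, hlt⟩ := (pvB_iff lados).mp hB
    have m1 := pvMono lados i (i + 1) (by omega) (by omega)
    have m2 := pvMono lados (i + 1) (i + 2) (by omega) hi
    have ht : pvTri ((PySem.List.sorted lados (fun x => x)).getD i 0)
        ((PySem.List.sorted lados (fun x => x)).getD (i + 1) 0)
        ((PySem.List.sorted lados (fun x => x)).getD (i + 2) 0) := by
      unfold pvTri; omega
    have hsub : [(PySem.List.sorted lados (fun x => x)).getD i 0,
        (PySem.List.sorted lados (fun x => x)).getD (i + 1) 0,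
        (PySem.List.sorted lados (fun x => x)).getD (i + 2) 0].Subperm lados :=
      (pvIdxSublist3 _ i (i + 1) (i + 2) (by omega) (by omega) hi).subperm.trans
        (PySem.List.sorted_perm lados (fun x => x) false).subperm
    obtain ⟨p, q, r, hpq, hqr, hr, ht'⟩ := pvCore lados _ _ _ hsub ht
    exact ⟨p, q, r, by omega, by omega, hr, by omega, by omega, by omega, ht'⟩

-- ===== VERDICT (by name: the statement is the Claim_ definition above) =====
theorem trianguloValido_spec : Claim_equal_trianguloValido := by
  intro lados _
  unfold Spec_trianguloValido
  exact pvMain lados
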